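-- pv_equiv track=rewrite | github.com/crhammond88/CodeArchive | Python/6.00x/midterm1/madlibs.py | generateForm
-- ===== SOURCE A (Python) =====
-- def generateForm(story, listOfAdjs, listOfNouns, listOfVerbs):
-- #returns the story with Adjs, Nouns, and Verbs from the lists omitted
--     #split story into list of words
--     words = story.split(' ')
--     #create dict matching lists to replacements
--     lists = {'[ADJ]': listOfAdjs, '[NOUN]': listOfNouns, '[VERB]': listOfVerbs}
--     #create new string
--     madStory = ''
--     #for word in words
--     for word in words:
--         #check in each list for word
--         #establish notInList condition
--         notInList = True
--         for check in lists:
--             #if word, minus extra characters, is in list dict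
--             if word.strip(" !@#$%^&*()-_+={}[]|\\:;'<>?,./\"") in lists[check]:
--                 #set notInList to False
--                 notInList = False
--                 #create variable to save nonalphanumeric characters
--                 extras = ''
--                 #for letter in word
--                 for letter in word:
--                     #if not alphanumeric
--                     if not letter.isalnum():
--                         #add letter to extras
--                         extras += letter
--                 #change word to replacement, the key in dict, plus the extra characters
--                 word = check + extras
--                 #add word to new string plus a space
--                 madStory += word + ' '
--                 break
--         #if not in lists
--         if notInList:
--             #add word to new string plus a space
--             madStory += word + ' '
--     #return new string
--     return madStory
-- ===== SOURCE B (Python) =====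
-- def generateForm(story, listOfAdjs, listOfNouns, listOfVerbs):
--     # Staged passes: tag slots by category with adjectives first (so they win ties,
--     # matching A's ADJ > NOUN > VERB break), then nouns on still-untagged slots,
--     # then verbs; finally render the tagged/untagged slots.
--     STRIP = " !@#$%^&*()-_+={}[]|\\:;'<>?,./\""
--     slots = [(w, w.strip(STRIP)) for w in story.split(' ')]
--     out = [None] * len(slots)
--     for tag, lst in (('[ADJ]', listOfAdjs), ('[NOUN]', listOfNouns), ('[VERB]', listOfVerbs)):
--         members = set(lst)
--         out = [o if o is not None
--                else (tag + ''.join(c for c in w if not c.isalnum())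
--                      if core in members else None)
--                for (w, core), o in zip(slots, out)]
--     return ''.join((w if o is None else o) + ' ' for (w, _), o in zip(slots, out))
-- ===== Notes on version B (the rewrite author's own statement) =====
-- stated objective: alternative
-- what changed: B interchanges the loops: instead of A's per-word inner scan over the three category lists, B makes three staged passes over a precomputed (word, core) slot array with a parallel Option tag array -- adjectives first so they win ties, each later pass only filling still-untagged slots -- and then renders all slots in one join.
import Mathlib
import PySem

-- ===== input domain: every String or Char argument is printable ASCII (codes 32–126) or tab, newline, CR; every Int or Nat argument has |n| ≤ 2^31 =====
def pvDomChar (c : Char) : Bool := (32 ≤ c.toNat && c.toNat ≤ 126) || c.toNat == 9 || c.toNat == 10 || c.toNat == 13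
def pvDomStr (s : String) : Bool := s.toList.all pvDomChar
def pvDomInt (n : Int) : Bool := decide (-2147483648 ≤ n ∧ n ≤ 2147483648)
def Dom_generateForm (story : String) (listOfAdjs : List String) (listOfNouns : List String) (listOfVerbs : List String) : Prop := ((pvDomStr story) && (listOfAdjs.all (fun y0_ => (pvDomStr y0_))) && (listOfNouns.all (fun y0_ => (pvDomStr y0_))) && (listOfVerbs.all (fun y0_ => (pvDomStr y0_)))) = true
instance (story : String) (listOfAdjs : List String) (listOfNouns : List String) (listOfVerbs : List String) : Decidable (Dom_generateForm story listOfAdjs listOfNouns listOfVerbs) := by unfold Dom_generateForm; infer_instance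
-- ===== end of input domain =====

-- B interchanges the loops: three staged tagging passes over a (word, core) slot array
-- (adjectives first so they win ties) instead of A's per-word scan over the three lists;
-- same return value.
-- ===== PORT A =====
-- Strings are ported through PySem.Str/Chars; the character-accumulating 'extras'
-- loop is ported over the word's character list (exact: Python str concatenation of chars).
def pvStripChars : String := " !@#$%^&*()-_+={}[]|\\:;'<>?,./\""

def pvExtrasA (word : String) : List Char :=
  word.toList.foldl (fun extras letter =>
    if (!PySem.Chars.isalnum letter) = true then extras ++ [letter] else extras) []

def pvInnerA (lists : PySem.Dict String (List String)) (keys : List String)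
    (word madStory : String) : Bool × String :=
  match keys with
  | [] => (true, madStory)
  | check :: rest =>
    if PySem.Str.stripChars word pvStripChars ∈ lists.getD check [] then
      (false, madStory ++ ((check ++ String.ofList (pvExtrasA word)) ++ " "))
    else pvInnerA lists rest word madStory

def generateForm (story : String) (listOfAdjs : List String) (listOfNouns : List String) (listOfVerbs : List String) : String :=
  let words := (PySem.Str.split? story " ").getD []
  let lists : PySem.Dict String (List String) :=
    ((PySem.Dict.empty.insert "[ADJ]" listOfAdjs).insert "[NOUN]" listOfNouns).insert "[VERB]" listOfVerbs
  words.foldl (fun madStory word =>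
    let r := pvInnerA lists lists.keys word madStory
    if r.1 then r.2 ++ (word ++ " ") else r.2) ""

-- ===== PORT B =====
def pvTagged (tag w : String) : String :=
  tag ++ String.ofList (w.toList.filter (fun c => !PySem.Chars.isalnum c))

-- one staged pass: fill still-untagged slots whose core is in the member set
def pvPass (tag : String) (members : PySem.Set String)
    (slots : List (String × String)) (out : List (Option String)) : List (Option String) :=
  List.zipWith (fun sl o =>
    match o with
    | some s => some s
    | none => if PySem.Set.contains members sl.2 then some (pvTagged tag sl.1) else none) slots out

def generateForm_alt (story : String) (listOfAdjs : List String) (listOfNouns : List String) (listOfVerbs : List String) : String :=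
  let slots := ((PySem.Str.split? story " ").getD []).map
    (fun w => (w, PySem.Str.stripChars w pvStripChars))
  let out0 : List (Option String) := slots.map (fun _ => (none : Option String))
  let out1 := pvPass "[ADJ]" (PySem.Set.ofList listOfAdjs) slots out0
  let out2 := pvPass "[NOUN]" (PySem.Set.ofList listOfNouns) slots out1
  let out3 := pvPass "[VERB]" (PySem.Set.ofList listOfVerbs) slots out2
  PySem.Str.join "" (List.zipWith (fun sl o =>
    (match o with | none => sl.1 | some s => s) ++ " ") slots out3)

-- ===== PRECONDITION & SPEC =====
def Spec_generateForm (story : String) (listOfAdjs : List String) (listOfNouns : List String) (listOfVerbs : List String) (out : String) : Prop := out = generateForm_alt story listOfAdjs listOfNouns listOfVerbs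
instance (story : String) (listOfAdjs : List String) (listOfNouns : List String) (listOfVerbs : List String) (out : String) : Decidable (Spec_generateForm story listOfAdjs listOfNouns listOfVerbs out) := by unfold Spec_generateForm; infer_instance

-- ===== CLAIM (what is proved, stated in full; the proofs are below) =====
def Claim_equal_generateForm : Prop := ∀ (story : String) (listOfAdjs : List String) (listOfNouns : List String) (listOfVerbs : List String), Dom_generateForm story listOfAdjs listOfNouns listOfVerbs → Spec_generateForm story listOfAdjs listOfNouns listOfVerbs (generateForm story listOfAdjs listOfNouns listOfVerbs)

-- ===== LEMMAS AND PROOFS =====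
-- the per-word value both programs produce
def pvG (a n v : List String) (w : String) : String :=
  let core := PySem.Str.stripChars w pvStripChars
  if core ∈ a then pvTagged "[ADJ]" w
  else if core ∈ n then pvTagged "[NOUN]" w
  else if core ∈ v then pvTagged "[VERB]" w
  else w

theorem pv_extras_eq (word : String) :
    pvExtrasA word = word.toList.filter (fun c => !PySem.Chars.isalnum c) := by
  have h := PySem.List.foldl_append_if (fun c => !PySem.Chars.isalnum c) id word.toList []
  simpa [pvExtrasA] using h

theorem pv_lists_keys (a n v : List String) :
    (((PySem.Dict.empty.insert "[ADJ]" a).insert "[NOUN]" n).insert "[VERB]" v).keys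
      = ["[ADJ]", "[NOUN]", "[VERB]"] := by
  simp [PySem.Dict.insert, PySem.Dict.empty, PySem.Dict.keys]

theorem pv_lists_getD_adj (a n v : List String) :
    (((PySem.Dict.empty.insert "[ADJ]" a).insert "[NOUN]" n).insert "[VERB]" v).getD "[ADJ]" [] = a := by
  simp [PySem.Dict.getD_insert]

theorem pv_lists_getD_noun (a n v : List String) :
    (((PySem.Dict.empty.insert "[ADJ]" a).insert "[NOUN]" n).insert "[VERB]" v).getD "[NOUN]" [] = n := by
  simp [PySem.Dict.getD_insert]

theorem pv_lists_getD_verb (a n v : List String) :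
    (((PySem.Dict.empty.insert "[ADJ]" a).insert "[NOUN]" n).insert "[VERB]" v).getD "[VERB]" [] = v := by
  simp

-- A's step appends pvG of the word
theorem pv_stepA_eq (a n v : List String) (word madStory : String) :
    (let r := pvInnerA (((PySem.Dict.empty.insert "[ADJ]" a).insert "[NOUN]" n).insert "[VERB]" v)
        (((PySem.Dict.empty.insert "[ADJ]" a).insert "[NOUN]" n).insert "[VERB]" v).keys word madStory
     if r.1 then r.2 ++ (word ++ " ") else r.2)
      = madStory ++ (pvG a n v word ++ " ") := by
  rw [pv_lists_keys]
  simp only [pvInnerA, pv_lists_getD_adj, pv_lists_getD_noun, pv_lists_getD_verb,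
    pvG, pvTagged, pv_extras_eq]
  by_cases h1 : PySem.Str.stripChars word pvStripChars ∈ a
  · simp [h1, String.append_assoc]
  · by_cases h2 : PySem.Str.stripChars word pvStripChars ∈ n
    · simp [h1, h2, String.append_assoc]
    · by_cases h3 : PySem.Str.stripChars word pvStripChars ∈ v
      · simp [h1, h2, h3, String.append_assoc]
      · simp [h1, h2, h3]

theorem pv_sjoin_nil : PySem.Str.join "" ([] : List String) = "" := by
  apply String.ext
  simp [PySem.Str.toList_join, PySem.Chars.join, List.intercalate]

theorem pv_sjoin_cons (p : String) (r : List String) :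
    PySem.Str.join "" (p :: r) = p ++ PySem.Str.join "" r := by
  apply String.ext
  cases r with
  | nil =>
    simp [PySem.Str.toList_join, PySem.Chars.join, List.intercalate, String.toList_append]
  | cons q t =>
    simp [PySem.Str.toList_join, PySem.Chars.join_cons_cons, String.toList_append]

-- the accumulating fold is a flat join
theorem pv_fold_join (f : String → String) (ws : List String) (acc : String) :
    ws.foldl (fun m w => m ++ (f w ++ " ")) acc
      = acc ++ PySem.Str.join "" (ws.map (fun w => f w ++ " ")) := by
  induction ws generalizing acc with
  | nil => simp [pv_sjoin_nil]
  | cons w t ih =>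
    rw [List.foldl_cons, ih]
    simp [pv_sjoin_cons, String.append_assoc]

-- staged zipWith passes compose pointwise
theorem pv_zipWith_zipWith {α β γ δ : Type} (g : α → γ → δ) (f : α → β → γ)
    (l : List α) (out : List β) :
    List.zipWith g l (List.zipWith f l out) = List.zipWith (fun s o => g s (f s o)) l out := by
  induction l generalizing out with
  | nil => simp
  | cons x t ih =>
    cases out with
    | nil => simp
    | cons o os => simp [List.zipWith, ih]

theorem pv_zipWith_map {α β γ δ : Type} (F : β → γ → δ) (g : α → β) (k : α → γ) (l : List α) :
    List.zipWith F (l.map g) (l.map k) = l.map (fun x => F (g x) (k x)) := by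
  induction l with
  | nil => simp
  | cons x t ih => simp only [List.map_cons, List.zipWith_cons_cons, ih]

theorem pv_set_mem (l : List String) (x : String) :
    PySem.Set.contains (PySem.Set.ofList l) x = decide (x ∈ l) := by
  by_cases h : x ∈ l
  · simp [PySem.Set.contains, h, (PySem.Set.mem_ofList l x).2 h]
  · have : x ∉ PySem.Set.ofList l := fun hm => h ((PySem.Set.mem_ofList l x).1 hm)
    simp [PySem.Set.contains, h, this]

theorem pv_alt_eq (story : String) (a n v : List String) :
    generateForm_alt story a n v
      = PySem.Str.join ""
          (((PySem.Str.split? story " ").getD []).map (fun w => pvG a n v w ++ " ")) := by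
  unfold generateForm_alt pvPass
  simp only [pv_zipWith_zipWith, List.map_map]
  rw [pv_zipWith_map]
  congr 1
  apply List.map_congr_left
  intro w _
  simp only [Function.comp, pvG, pv_set_mem]
  by_cases h1 : PySem.Str.stripChars w pvStripChars ∈ a
  · simp [h1]
  · by_cases h2 : PySem.Str.stripChars w pvStripChars ∈ n
    · simp [h1, h2]
    · by_cases h3 : PySem.Str.stripChars w pvStripChars ∈ v
      · simp [h1, h2, h3]
      · simp [h1, h2, h3]

-- ===== VERDICT (by name: the statement is the Claim_ definition above) =====
theorem generateForm_spec : Claim_equal_generateForm := by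
  intro story a n v _
  unfold Spec_generateForm generateForm
  simp only []
  have hstep : (fun (madStory word : String) =>
      let r := pvInnerA (((PySem.Dict.empty.insert "[ADJ]" a).insert "[NOUN]" n).insert "[VERB]" v)
          (((PySem.Dict.empty.insert "[ADJ]" a).insert "[NOUN]" n).insert "[VERB]" v).keys word madStory
      if r.1 then r.2 ++ (word ++ " ") else r.2)
      = fun (m w : String) => m ++ (pvG a n v w ++ " ") := by
    funext m w; exact pv_stepA_eq a n v w m
  rw [hstep, pv_fold_join, pv_alt_eq]
  simp
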